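-- pv_equiv track=rewrite | github.com/Grochoci/Connect-Four | a1.py | next_player
-- ===== SOURCE A (Python) =====
-- PLAYERS = "XO"
--
-- def next_player(cur_player):
--     '''(str) -> str
--
--        Return the next player to make their move.
--
--        >>> next_player('X')
--        'O'
--     '''
--
--     # Number of players playing
--     num_players = len(PLAYERS)
--
--     # Find out the index of cur_player in PLAYER
--     i = 0
--     cur_token = 0
--     while i < len(PLAYERS):
--         if PLAYERS[i] == cur_player:
--             cur_token = i
--             i = len(PLAYERS)
--         elif PLAYERS[i] != cur_player:
--             i = i + 1
--
--     # If the last player is the cur_player, reset the idx to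
--     # 0 so that the order of players starts from the start.
--     if cur_player == PLAYERS[(num_players) - 1]:
--         player = PLAYERS[0]
--
--     # If the cur_player is not the last player, move idx forward
--     # by one and make that the cur_player.
--     elif cur_player != PLAYERS[(num_players) - 1]:
--         player = PLAYERS[cur_token + 1]
--
--     return  player
-- ===== SOURCE B (Python) =====
-- PLAYERS = "XO"
--
-- def next_player(cur_player):
--     # Closed form: the scan over PLAYERS is unnecessary for two players;
--     # any token other than 'O' (including unknown tokens, which A maps to 'O')
--     # is followed by 'O', and 'O' is followed by 'X'.
--     return 'X' if cur_player == 'O' else 'O'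
-- ===== Notes on version B (the rewrite author's own statement) =====
-- stated objective: simpler
-- what changed: Replaced A's index-scanning while loop over PLAYERS plus last-player branching with a single closed-form conditional on equality with 'O'.
import Mathlib
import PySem

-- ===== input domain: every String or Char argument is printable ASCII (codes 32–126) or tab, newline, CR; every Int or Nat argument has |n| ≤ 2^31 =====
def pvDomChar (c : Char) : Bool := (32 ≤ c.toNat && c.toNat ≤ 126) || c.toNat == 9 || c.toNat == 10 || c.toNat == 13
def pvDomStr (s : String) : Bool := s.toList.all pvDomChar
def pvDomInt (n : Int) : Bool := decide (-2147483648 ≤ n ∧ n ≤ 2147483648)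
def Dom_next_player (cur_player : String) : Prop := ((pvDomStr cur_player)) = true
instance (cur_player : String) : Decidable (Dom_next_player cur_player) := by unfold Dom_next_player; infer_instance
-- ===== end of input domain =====

-- B replaces A's scan loop over PLAYERS by a single closed-form conditional (objective: simpler).

-- ===== PORT A =====
def PLAYERS : String := "XO"

-- the while loop of A: state (i, cur_token); fuel = len(PLAYERS)+1 bounds the iterations
-- (each step either increments i or sets i = len, so len+1 steps always suffice to exit)
def next_player_loopA (cur_player : String) : Nat → Int → Int → Int
  | 0, _, cur_token => cur_token
  | f + 1, i, cur_token =>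
    if i < PySem.Str.len PLAYERS then
      match PySem.Str.pyGet? PLAYERS i with
      | some c =>
        if String.singleton c == cur_player then
          next_player_loopA cur_player f (PySem.Str.len PLAYERS) i
        else
          next_player_loopA cur_player f (i + 1) cur_token
      | none => cur_token   -- unreachable: i < len
    else
      cur_token

def next_player (cur_player : String) : String :=
  let num_players : Int := PySem.Str.len PLAYERS
  let cur_token := next_player_loopA cur_player (PLAYERS.length + 1) 0 0
  -- indices below are always in range (cur_token+1 ≤ 1 in the branch reached), so .getD "" never fires
  if cur_player == ((PySem.Str.pyGet? PLAYERS (num_players - 1)).map String.singleton).getD "" then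
    ((PySem.Str.pyGet? PLAYERS 0).map String.singleton).getD ""
  else
    ((PySem.Str.pyGet? PLAYERS (cur_token + 1)).map String.singleton).getD ""

-- ===== PORT B =====
def next_player_alt (cur_player : String) : String :=
  if cur_player == "O" then "X" else "O"

-- ===== PRECONDITION & SPEC =====
def Spec_next_player (cur_player : String) (out : String) : Prop := out = next_player_alt cur_player
instance (cur_player : String) (out : String) : Decidable (Spec_next_player cur_player out) := by unfold Spec_next_player; infer_instance

-- ===== CLAIM (what is proved, stated in full; the proofs are below) =====
def Claim_equal_next_player : Prop := ∀ (cur_player : String), Dom_next_player cur_player → Spec_next_player cur_player (next_player cur_player)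

-- ===== LEMMAS AND PROOFS =====

-- when cur_player ≠ "O", the loop leaves cur_token = 0
theorem loopA_eq_zero (cur_player : String) (h : cur_player ≠ "O") :
    next_player_loopA cur_player (PLAYERS.length + 1) 0 0 = 0 := by
  by_cases hx : cur_player = "X"
  · subst hx; decide
  · have h1 : ¬ (String.singleton 'X' == cur_player) = true := by
      simp [String.singleton]; intro hc; exact hx hc.symm
    have h2 : ¬ (String.singleton 'O' == cur_player) = true := by
      simp [String.singleton]; intro hc; exact h hc.symm
    have hf : PLAYERS.length + 1 = 3 := by decide
    rw [hf]
    simp [PLAYERS, next_player_loopA, PySem.Str.len, PySem.Str.pyGet?, h1, h2]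

-- ===== VERDICT (by name: the statement is the Claim_ definition above) =====
theorem next_player_spec : Claim_equal_next_player := by
  intro cur_player _
  unfold Spec_next_player next_player next_player_alt
  by_cases h : cur_player = "O"
  · subst h; decide
  · have hb : cur_player ≠ String.singleton 'O' := by
      simpa [show String.singleton 'O' = "O" from rfl] using h
    have hb2 : ¬ (cur_player == "O") = true := by simpa using h
    rw [loopA_eq_zero cur_player h]
    simp [PLAYERS, PySem.Str.len, PySem.Str.pyGet?, hb, hb2]
    rfl
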